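-- pv_equiv track=rewrite | github.com/danierortega/RetosMinTic | RetosCiclo_1/reto4.py | verificar_fallas
-- ===== SOURCE A (Python) =====
-- def verificar_fallas(baldosa,k):
--     fallas_totales=0
--     falla_detectada=0
--     diccionario=dict()
--     for count,value in enumerate(baldosa):
--         if(value in diccionario and count - diccionario.get(value)<=k):
--             falla_detectada+=1
--         if(value in diccionario):
--             fallas_totales+=1
--         diccionario[value]=count
--     return fallas_totales,falla_detectada
-- ===== SOURCE B (Python) =====
-- def verificar_fallas(baldosa, k):
--     posiciones = {}
--     for i, v in enumerate(baldosa):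
--         posiciones.setdefault(v, []).append(i)
--     fallas_totales = 0
--     falla_detectada = 0
--     for pos in posiciones.values():
--         fallas_totales += len(pos) - 1
--         for a, b in zip(pos, pos[1:]):
--             if b - a <= k:
--                 falla_detectada += 1
--     return fallas_totales, falla_detectada
-- ===== Notes on version B (the rewrite author's own statement) =====
-- stated objective: alternative
-- what changed: A's single interleaved pass with a last-index dict is replaced by building an index table (value -> list of positions) and then scanning each group: len-1 repeats per group and one detection per adjacent pair with gap <= k.
import Mathlib
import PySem

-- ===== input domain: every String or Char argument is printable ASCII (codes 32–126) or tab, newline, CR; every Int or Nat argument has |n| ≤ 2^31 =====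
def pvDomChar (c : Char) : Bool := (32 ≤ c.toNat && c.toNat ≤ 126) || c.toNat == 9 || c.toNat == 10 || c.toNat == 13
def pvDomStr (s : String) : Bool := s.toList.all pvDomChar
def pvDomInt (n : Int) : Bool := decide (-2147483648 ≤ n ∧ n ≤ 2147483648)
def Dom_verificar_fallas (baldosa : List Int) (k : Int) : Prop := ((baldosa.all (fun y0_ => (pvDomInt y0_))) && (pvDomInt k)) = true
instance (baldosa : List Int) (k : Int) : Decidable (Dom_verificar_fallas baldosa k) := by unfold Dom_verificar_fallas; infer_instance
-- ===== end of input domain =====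

-- B replaces A's single interleaved last-index-dict pass by an index table (value -> positions) followed by a per-group scan; same cost, different decomposition.


-- ===== PORT A =====
def verificar_fallas (baldosa : List Int) (k : Int) : Int × Int :=
  let st := (PySem.List.enumerate baldosa).foldl
    (fun (st : Int × Int × PySem.Dict Int Int) cv =>
      let fallas_totales := st.1
      let falla_detectada := st.2.1
      let diccionario := st.2.2
      let falla_detectada :=
        if diccionario.contains cv.2 ∧ cv.1 - (diccionario.get? cv.2).getD 0 ≤ k
        then falla_detectada + 1 else falla_detectada
      let fallas_totales :=
        if diccionario.contains cv.2 then fallas_totales + 1 else fallas_totales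
      (fallas_totales, falla_detectada, diccionario.insert cv.2 cv.1))
    (0, 0, PySem.Dict.empty)
  (st.1, st.2.1)

-- ===== PORT B =====
def verificar_fallas_alt (baldosa : List Int) (k : Int) : Int × Int :=
  let posiciones := (PySem.List.enumerate baldosa).foldl
    (fun (d : PySem.Dict Int (List Int)) q => d.modify q.2 [] (· ++ [q.1]))
    PySem.Dict.empty
  posiciones.values.foldl
    (fun (st : Int × Int) pos =>
      (st.1 + ((pos.length : Int) - 1),
       (pos.zip (pos.drop 1)).foldl
         (fun fd ab => if ab.2 - ab.1 ≤ k then fd + 1 else fd) st.2))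
    (0, 0)

-- ===== PRECONDITION & SPEC =====
def Spec_verificar_fallas (baldosa : List Int) (k : Int) (out : Int × Int) : Prop := out = verificar_fallas_alt baldosa k
instance (baldosa : List Int) (k : Int) (out : Int × Int) : Decidable (Spec_verificar_fallas baldosa k out) := by unfold Spec_verificar_fallas; infer_instance

-- ===== CLAIM (what is proved, stated in full; the proofs are below) =====
def Claim_equal_verificar_fallas : Prop := ∀ (baldosa : List Int) (k : Int), Dom_verificar_fallas baldosa k → Spec_verificar_fallas baldosa k (verificar_fallas baldosa k)

-- ===== LEMMAS AND PROOFS =====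

-- positions (as produced by enumerate) of value v in p
def occ (p : List Int) (v : Int) : List Int :=
  ((PySem.List.enumerate p).filter (fun q => q.2 == v)).map (·.1)

-- per-group contributions of B
def tileA (pos : List Int) : Int := (pos.length : Int) - 1
def gapcnt (k : Int) (pos : List Int) : Int :=
  (pos.zip (pos.drop 1)).foldl (fun fd ab => if ab.2 - ab.1 ≤ k then fd + 1 else fd) 0

theorem occ_append (p : List Int) (x v : Int) :
    occ (p ++ [x]) v = occ p v ++ (if x == v then [(p.length : Int)] else []) := by
  simp [occ, PySem.List.enumerate_append, PySem.List.enumerate_cons, PySem.List.enumerate_nil,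
        List.filter_append]
  split_ifs with h <;> simp [h]

theorem occ_eq_nil (p : List Int) (x : Int) (hx : x ∉ p) : occ p x = [] := by
  simp only [occ, List.map_eq_nil_iff, List.filter_eq_nil_iff]
  intro q hq hq2
  exact hx (by
    have : q.2 ∈ (PySem.List.enumerate p).map (·.2) := List.mem_map_of_mem hq
    rw [PySem.List.map_snd_enumerate] at this
    simpa [show q.2 = x from by simpa using hq2] using this)

theorem occ_ne_nil (p : List Int) (x : Int) (hx : x ∈ p) : occ p x ≠ [] := by
  have : x ∈ (PySem.List.enumerate p).map (·.2) := by rw [PySem.List.map_snd_enumerate]; exact hx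
  obtain ⟨q, hq, hq2⟩ := List.mem_map.mp this
  simp only [occ, ne_eq, List.map_eq_nil_iff, List.filter_eq_nil_iff, not_forall]
  exact ⟨q, hq, by simpa using hq2⟩

theorem gap_shift (k : Int) (l : List (Int × Int)) (c : Int) :
    l.foldl (fun fd ab => if ab.2 - ab.1 ≤ k then fd + 1 else fd) c
      = c + l.foldl (fun fd ab => if ab.2 - ab.1 ≤ k then fd + 1 else fd) 0 := by
  induction l generalizing c with
  | nil => simp
  | cons a t ih =>
    simp only [List.foldl_cons]
    rw [ih, ih (if a.2 - a.1 ≤ k then 0 + 1 else 0)]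
    split_ifs <;> ring

theorem zip_tail_append (pos : List Int) (h : pos ≠ []) (n : Int) :
    (pos ++ [n]).zip ((pos ++ [n]).drop 1)
      = pos.zip (pos.drop 1) ++ [(pos.getLast h, n)] := by
  induction pos with
  | nil => exact absurd rfl h
  | cons a t ih =>
    cases t with
    | nil => simp
    | cons b u =>
      have := ih (by simp)
      simp only [List.cons_append, List.drop_one] at *
      simpa [List.getLast] using this

theorem gapcnt_append (k : Int) (pos : List Int) (h : pos ≠ []) (n : Int) :
    gapcnt k (pos ++ [n]) = gapcnt k pos + (if n - pos.getLast h ≤ k then 1 else 0) := by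
  rw [gapcnt, zip_tail_append pos h n, List.foldl_append, gap_shift]
  simp [gapcnt]

theorem sum_update (s : List Int) (x : Int) (f g : Int → Int) (hn : s.Nodup) (hx : x ∈ s)
    (hfg : ∀ v ∈ s, v ≠ x → g v = f v) :
    (s.map g).sum = (s.map f).sum + (g x - f x) := by
  induction s with
  | nil => cases hx
  | cons a t ih =>
    have ha : a ∉ t := (List.nodup_cons.mp hn).1
    have hnt : t.Nodup := (List.nodup_cons.mp hn).2
    by_cases hax : a = x
    · subst hax
      have : t.map g = t.map f := List.map_congr_left (fun v hv => hfg v (List.mem_cons_of_mem _ hv) (fun e => ha (e ▸ hv)))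
      simp [this]; ring
    · have hxt : x ∈ t := by cases hx with | head => exact absurd rfl hax | tail _ h => exact h
      have := ih hnt hxt (fun v hv hvx => hfg v (List.mem_cons_of_mem _ hv) hvx)
      simp [hfg a (List.mem_cons_self) hax, this]; ring

theorem getD_groups (l : List (Int × Int)) (d : PySem.Dict Int (List Int)) (v : Int) :
    (l.foldl (fun d q => d.modify q.2 [] (· ++ [q.1])) d).getD v []
      = d.getD v [] ++ (l.filter (fun q => q.2 == v)).map (·.1) := by
  induction l generalizing d with
  | nil => simp
  | cons q t ih =>
    simp only [List.foldl_cons, ih, List.filter_cons]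
    rw [PySem.Dict.getD_modify]
    split_ifs with h1 h2 h2
    · simp [h1]
    · exact absurd (by simpa using h1.symm) (by simpa using h2)
    · exact absurd (by simpa using h2) (by simpa [h1] using fun e => h1 e.symm)
    · simp

-- B's result as sums of per-group contributions over the distinct values
theorem alt_sum (baldosa : List Int) (k : Int) :
    verificar_fallas_alt baldosa k
      = (((PySem.Set.ofList baldosa).map (fun v => tileA (occ baldosa v))).sum,
         ((PySem.Set.ofList baldosa).map (fun v => gapcnt k (occ baldosa v))).sum) := by
  have hkeys : ((PySem.List.enumerate baldosa).foldl
      (fun (d : PySem.Dict Int (List Int)) q => d.modify q.2 [] (· ++ [q.1]))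
      PySem.Dict.empty).keys = PySem.Set.ofList baldosa := by
    rw [PySem.Dict.keys_foldl_modify_key]
    simp [PySem.List.map_snd_enumerate, PySem.Set.update_nil_left, PySem.Dict.keys_empty]
  have hnd : ((PySem.List.enumerate baldosa).foldl
      (fun (d : PySem.Dict Int (List Int)) q => d.modify q.2 [] (· ++ [q.1]))
      PySem.Dict.empty).keys.Nodup := by
    rw [hkeys]; exact PySem.Set.nodup_ofList _
  have hvals : ((PySem.List.enumerate baldosa).foldl
      (fun (d : PySem.Dict Int (List Int)) q => d.modify q.2 [] (· ++ [q.1]))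
      PySem.Dict.empty).values
      = (PySem.Set.ofList baldosa).map (fun v => occ baldosa v) := by
    rw [PySem.Dict.values_eq_map_keys _ hnd [], hkeys]
    refine List.map_congr_left (fun v _ => ?_)
    rw [getD_groups]
    simp [occ]
  show (_ : PySem.Dict Int (List Int)).values.foldl _ (0, 0) = _
  rw [hvals]
  rw [List.foldl_map]
  have main : ∀ (s : List Int) (st : Int × Int),
      s.foldl (fun (st : Int × Int) v =>
        (st.1 + (((occ baldosa v).length : Int) - 1),
         ((occ baldosa v).zip ((occ baldosa v).drop 1)).foldl
           (fun fd ab => if ab.2 - ab.1 ≤ k then fd + 1 else fd) st.2)) st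
      = (st.1 + (s.map (fun v => tileA (occ baldosa v))).sum,
         st.2 + (s.map (fun v => gapcnt k (occ baldosa v))).sum) := by
    intro s
    induction s with
    | nil => intro st; simp
    | cons a t ih =>
      intro st
      simp only [List.foldl_cons, ih, List.map_cons, List.sum_cons]
      rw [gap_shift]
      simp only [tileA, gapcnt, Prod.mk.injEq]
      constructor <;> ring
  rw [main]
  simp

-- the main invariant for A's single pass
def stepA (k : Int) (st : Int × Int × PySem.Dict Int Int) (cv : Int × Int) :
    Int × Int × PySem.Dict Int Int :=
  let fallas_totales := st.1
  let falla_detectada := st.2.1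
  let diccionario := st.2.2
  let falla_detectada :=
    if diccionario.contains cv.2 ∧ cv.1 - (diccionario.get? cv.2).getD 0 ≤ k
    then falla_detectada + 1 else falla_detectada
  let fallas_totales :=
    if diccionario.contains cv.2 then fallas_totales + 1 else fallas_totales
  (fallas_totales, falla_detectada, diccionario.insert cv.2 cv.1)

theorem A_eq_stepA_fold (baldosa : List Int) (k : Int) :
    verificar_fallas baldosa k
      = (((PySem.List.enumerate baldosa).foldl (stepA k) (0, 0, PySem.Dict.empty)).1,
         ((PySem.List.enumerate baldosa).foldl (stepA k) (0, 0, PySem.Dict.empty)).2.1) := rfl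

theorem A_invariant (k : Int) (p : List Int) :
    ((PySem.List.enumerate p).foldl (stepA k) (0, 0, PySem.Dict.empty)).1
        = (((PySem.Set.ofList p).map (fun v => tileA (occ p v))).sum) ∧
    ((PySem.List.enumerate p).foldl (stepA k) (0, 0, PySem.Dict.empty)).2.1
        = (((PySem.Set.ofList p).map (fun v => gapcnt k (occ p v))).sum) ∧
    ∀ v, ((PySem.List.enumerate p).foldl (stepA k) (0, 0, PySem.Dict.empty)).2.2.get? v
        = (occ p v).getLast? := by
  induction p using List.reverseRecOn with
  | nil =>
    refine ⟨by simp [PySem.List.enumerate_nil], by simp [PySem.List.enumerate_nil], ?_⟩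
    intro v
    simp [PySem.List.enumerate_nil, occ, PySem.Dict.get?_empty]
  | append_singleton p x ih =>
    obtain ⟨ih1, ih2, ih3⟩ := ih
    rw [show PySem.List.enumerate (p ++ [x]) = PySem.List.enumerate p ++ [((p.length : Int), x)] from by
      rw [PySem.List.enumerate_append]
      simp [PySem.List.enumerate_cons, PySem.List.enumerate_nil]]
    simp only [List.foldl_append, List.foldl_cons, List.foldl_nil]
    generalize hstdef : (PySem.List.enumerate p).foldl (stepA k) (0, 0, PySem.Dict.empty) = st at ih1 ih2 ih3
    have hget : st.2.2.get? x = (occ p x).getLast? := ih3 x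
    rw [PySem.Set.ofList_append_singleton]
    by_cases hx : x ∈ p
    · have hne := occ_ne_nil p x hx
      have hlast : (occ p x).getLast? = some ((occ p x).getLast hne) :=
        List.getLast?_eq_some_getLast hne
      have hc : st.2.2.contains x = true := by
        rw [PySem.Dict.contains_eq_isSome_get?, hget, hlast]; rfl
      have hadd : PySem.Set.add (PySem.Set.ofList p) x = PySem.Set.ofList p :=
        PySem.Set.add_of_mem ((PySem.Set.mem_ofList _ _).mpr hx)
      have hcongrT : ∀ v ∈ PySem.Set.ofList p, v ≠ x →
          (fun v => tileA (occ (p ++ [x]) v)) v = (fun v => tileA (occ p v)) v := by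
        intro v _ hvx
        simp [occ_append, show (x == v) = false from by simpa using fun e => hvx e.symm]
      have hcongrG : ∀ v ∈ PySem.Set.ofList p, v ≠ x →
          (fun v => gapcnt k (occ (p ++ [x]) v)) v = (fun v => gapcnt k (occ p v)) v := by
        intro v _ hvx
        simp [occ_append, show (x == v) = false from by simpa using fun e => hvx e.symm]
      refine ⟨?_, ?_, ?_⟩
      · simp only [stepA, hc, if_true]
        rw [hadd, sum_update (PySem.Set.ofList p) x _ _ (PySem.Set.nodup_ofList p)
            ((PySem.Set.mem_ofList _ _).mpr hx) hcongrT, ← ih1]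
        have : tileA (occ (p ++ [x]) x) - tileA (occ p x) = 1 := by
          simp [occ_append, tileA]
        simp only [this]
      · simp only [stepA, hc, hget, hlast, true_and, Option.getD_some]
        rw [hadd, sum_update (PySem.Set.ofList p) x _ _ (PySem.Set.nodup_ofList p)
            ((PySem.Set.mem_ofList _ _).mpr hx) hcongrG, ← ih2]
        have : gapcnt k (occ (p ++ [x]) x) - gapcnt k (occ p x)
            = if (p.length : Int) - (occ p x).getLast hne ≤ k then 1 else 0 := by
          rw [occ_append]
          simp only [BEq.rfl, if_true]
          rw [gapcnt_append k (occ p x) hne]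
          split_ifs <;> ring
        rw [this]
        split_ifs <;> ring
      · intro v
        simp only [stepA]
        rw [PySem.Dict.get?_insert]
        by_cases hvx : v = x
        · subst hvx
          simp [occ_append]
        · rw [if_neg hvx, ih3 v, occ_append]
          simp [show (x == v) = false from by simpa using fun e => hvx e.symm]
    · have h0 : occ p x = [] := occ_eq_nil p x hx
      have hc : st.2.2.contains x = false := by
        rw [PySem.Dict.contains_eq_isSome_get?, hget, h0]; rfl
      have hadd : PySem.Set.add (PySem.Set.ofList p) x = PySem.Set.ofList p ++ [x] :=
        PySem.Set.add_of_not_mem (fun h => hx ((PySem.Set.mem_ofList _ _).mp h))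
      have hcongrT : List.map (fun v => tileA (occ (p ++ [x]) v)) (PySem.Set.ofList p)
          = List.map (fun v => tileA (occ p v)) (PySem.Set.ofList p) := by
        refine List.map_congr_left (fun v hv => ?_)
        have hvx : v ≠ x := fun e => hx (e ▸ (PySem.Set.mem_ofList _ _).mp hv)
        simp [occ_append, show (x == v) = false from by simpa using fun e => hvx e.symm]
      have hcongrG : List.map (fun v => gapcnt k (occ (p ++ [x]) v)) (PySem.Set.ofList p)
          = List.map (fun v => gapcnt k (occ p v)) (PySem.Set.ofList p) := by
        refine List.map_congr_left (fun v hv => ?_)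
        have hvx : v ≠ x := fun e => hx (e ▸ (PySem.Set.mem_ofList _ _).mp hv)
        simp [occ_append, show (x == v) = false from by simpa using fun e => hvx e.symm]
      refine ⟨?_, ?_, ?_⟩
      · simp only [stepA, hc, Bool.false_eq_true, if_false, false_and]
        rw [hadd, List.map_append, List.sum_append, hcongrT, ← ih1]
        simp [occ_append, h0, tileA]
      · simp only [stepA, hc, Bool.false_eq_true, false_and, if_false]
        rw [hadd, List.map_append, List.sum_append, hcongrG, ← ih2]
        simp [occ_append, h0, gapcnt]
      · intro v
        simp only [stepA]
        rw [PySem.Dict.get?_insert]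
        by_cases hvx : v = x
        · subst hvx
          simp [occ_append, h0]
        · rw [if_neg hvx, ih3 v, occ_append]
          simp [show (x == v) = false from by simpa using fun e => hvx e.symm]

-- ===== VERDICT (by name: the statement is the Claim_ definition above) =====
theorem verificar_fallas_spec : Claim_equal_verificar_fallas := by
  intro baldosa k _
  unfold Spec_verificar_fallas
  rw [A_eq_stepA_fold, alt_sum, (A_invariant k baldosa).1, (A_invariant k baldosa).2.1]
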